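-- pv_equiv track=rewrite | github.com/jgunstone/ipyautoui | src/ipyautoui/custom/editgrid.py | get_default_row_data_from_schema_properties
-- ===== SOURCE A (Python) =====
-- import typing as ty
--
-- def get_default_row_data_from_schema_properties(properties: dict) -> ty.Optional[dict]:
--     """pulls default value from schema. intended for a dataframe (i.e. rows
--     of known columns only). assumes all fields have a 'title' (true when using
--     pydantic)
--
--     Args:
--         properties (dict): schema["items"]["properties"]
--
--     Returns:
--         list: list of dictionary column values
--     """
--     di = {}
--     for k, v in properties.items():
--         if "default" in v.keys():
--             di[k] = v["default"]
--         else: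
--             return None
--     return di
-- ===== SOURCE B (Python) =====
-- def get_default_row_data_from_schema_properties(properties: dict):
--     """Recursive: build the (key, default) pair list by structural recursion,
--     then convert it to a dict once at the end."""
--
--     def collect(items):
--         if not items:
--             return []
--         (k, v), rest = items[0], items[1:]
--         if "default" not in v:
--             return None
--         tail = collect(rest)
--         return None if tail is None else [(k, v["default"])] + tail
--
--     pairs = collect(list(properties.items()))
--     return None if pairs is None else dict(pairs)
-- ===== Notes on version B (the rewrite author's own statement) =====
-- stated objective: alternative
-- what changed: Replaced A's iterative loop that mutates a dict accumulator with early return by a structural recursion that assembles a list of (key, default) pairs and converts it to a dict once at the end.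
import Mathlib
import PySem

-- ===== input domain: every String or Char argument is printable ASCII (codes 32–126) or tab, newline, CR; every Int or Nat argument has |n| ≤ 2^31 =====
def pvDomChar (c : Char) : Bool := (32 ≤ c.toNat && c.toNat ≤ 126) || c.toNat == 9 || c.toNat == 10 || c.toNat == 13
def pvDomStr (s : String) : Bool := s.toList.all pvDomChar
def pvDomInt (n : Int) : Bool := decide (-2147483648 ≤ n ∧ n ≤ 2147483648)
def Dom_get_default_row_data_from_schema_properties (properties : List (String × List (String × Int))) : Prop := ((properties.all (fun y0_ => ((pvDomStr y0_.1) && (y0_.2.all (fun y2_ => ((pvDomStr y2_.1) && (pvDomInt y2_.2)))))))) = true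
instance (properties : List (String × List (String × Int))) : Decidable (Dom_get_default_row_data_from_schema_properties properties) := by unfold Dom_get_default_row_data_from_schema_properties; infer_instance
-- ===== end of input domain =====

-- B replaces A's iterative dict-accumulator loop with early return by a structural
-- recursion that builds the (key, default) pair list and one final dict() conversion
-- (objective: alternative decomposition).

-- ===== PORT A =====
-- Port of A: single loop over items, inserting defaults into the dict accumulator,
-- early `none` when a field lacks "default".
def getDefaultRowLoopA (di : PySem.Dict String Int) : List (String × List (String × Int)) → Option (List (String × Int))
  | [] => some di.items
  | (k, v) :: rest =>
    match List.lookup "default" v with            -- '"default" in v.keys()' + 'v["default"]' (first match)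
    | some d => getDefaultRowLoopA (di.insert k d) rest
    | none => none

def get_default_row_data_from_schema_properties (properties : List (String × List (String × Int))) : Option (List (String × Int)) :=
  getDefaultRowLoopA PySem.Dict.empty properties

-- ===== PORT B =====
-- `collect`: structural recursion returning the list of (key, default) pairs, or none.
def collectDefaults : List (String × List (String × Int)) → Option (List (String × Int))
  | [] => some []
  | (k, v) :: rest =>
    match List.lookup "default" v with            -- '"default" not in v' guard + 'v["default"]'
    | none => none
    | some d =>
      match collectDefaults rest with
      | none => none
      | some tail => some ((k, d) :: tail)

def get_default_row_data_from_schema_properties_alt (properties : List (String × List (String × Int))) : Option (List (String × Int)) :=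
  match collectDefaults properties with
  | none => none
  | some pairs =>
    -- dict(pairs): fold the pairs into a PySem.Dict once
    some ((pairs.foldl (fun di kv => di.insert kv.1 kv.2) PySem.Dict.empty).items)

-- ===== PRECONDITION & SPEC =====
def Spec_get_default_row_data_from_schema_properties (properties : List (String × List (String × Int))) (out : Option (List (String × Int))) : Prop := out = get_default_row_data_from_schema_properties_alt properties
instance (properties : List (String × List (String × Int))) (out : Option (List (String × Int))) : Decidable (Spec_get_default_row_data_from_schema_properties properties out) := by unfold Spec_get_default_row_data_from_schema_properties; infer_instance

-- ===== CLAIM (what is proved, stated in full; the proofs are below) =====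
def Claim_equal_get_default_row_data_from_schema_properties : Prop := ∀ (properties : List (String × List (String × Int))), Dom_get_default_row_data_from_schema_properties properties → Spec_get_default_row_data_from_schema_properties properties (get_default_row_data_from_schema_properties properties)

-- ===== LEMMAS AND PROOFS =====
-- Loop invariant: A's loop from accumulator `di` equals B's collected pair list
-- folded into that same accumulator.
theorem getDefaultRowLoopA_eq (rest : List (String × List (String × Int))) (di : PySem.Dict String Int) :
    getDefaultRowLoopA di rest =
      (collectDefaults rest).map
        (fun pairs => (pairs.foldl (fun d kv => d.insert kv.1 kv.2) di).items) := by
  induction rest generalizing di with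
  | nil => simp [getDefaultRowLoopA, collectDefaults]
  | cons kv rest ih =>
    obtain ⟨k, v⟩ := kv
    cases h : List.lookup "default" v with
    | none => simp [getDefaultRowLoopA, collectDefaults, h]
    | some d =>
      simp only [getDefaultRowLoopA, collectDefaults, h, ih]
      cases collectDefaults rest <;> simp

-- ===== VERDICT (by name: the statement is the Claim_ definition above) =====
theorem get_default_row_data_from_schema_properties_spec : Claim_equal_get_default_row_data_from_schema_properties := by
  intro properties _
  unfold Spec_get_default_row_data_from_schema_properties
  unfold get_default_row_data_from_schema_properties get_default_row_data_from_schema_properties_alt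
  rw [getDefaultRowLoopA_eq]
  cases collectDefaults properties <;> rfl
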